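-- pv_equiv track=rewrite | github.com/zhenzhiwin/pccsite | pcc_check.py | CRU_assert
-- ===== SOURCE A (Python) =====
-- def CRU_assert(configlist):
--     log_list = []
--     str = ''
--     for i in range(0, len(configlist)):
--         if configlist[i].find('charging-rule-unit "') != -1 and configlist[i].find('qci * arp * precedence') == -1:
--             for j in range(i, len(configlist)):
--                 if configlist[j].find("exit") != -1:
--                     for k in configlist[i:j]:
--                         str = str + k
--                     if str.find('rating-group') == -1:
--                         log_list.append(configlist[i].strip() + '未配置rating group')
--                     if str.find('service-identifier') == -1:
--                         log_list.append(configlist[i].strip() + '未配置service identifier')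
--                     if str.find('reporting-level service-id') == -1:
--                         log_list.append(configlist[i].strip() + '未配置reporting-level')
--                     str = ''
--                     break
--
--     return log_list
-- ===== SOURCE B (Python) =====
-- def CRU_assert(configlist):
--     # One backward pass: maintain the lines of the current rule block (up to the
--     # next 'exit' line) incrementally, so no per-rule forward rescan is needed;
--     # messages are collected in reverse and flipped once at the end.
--     rev = []
--     rl = None  # block lines in reverse order, None when no 'exit' line lies below
--     for line in reversed(configlist):
--         if 'exit' in line:
--             rl = []
--         elif rl is not None:
--             rl.append(line)
--         if ('charging-rule-unit "' in line and 'qci * arp * precedence' not in line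
--                 and rl is not None):
--             block = ''.join(reversed(rl))
--             head = line.strip()
--             if 'reporting-level service-id' not in block:
--                 rev.append(head + '未配置reporting-level')
--             if 'service-identifier' not in block:
--                 rev.append(head + '未配置service identifier')
--             if 'rating-group' not in block:
--                 rev.append(head + '未配置rating group')
--     rev.reverse()
--     return rev
-- ===== Notes on version B (the rewrite author's own statement) =====
-- stated objective: faster
-- what changed: Replaces the per-rule forward rescan for the closing 'exit' line (and the re-join of the block for every rule) by a single backward pass that maintains the current block's lines incrementally, emitting messages in reverse and flipping once.
import Mathlib
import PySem

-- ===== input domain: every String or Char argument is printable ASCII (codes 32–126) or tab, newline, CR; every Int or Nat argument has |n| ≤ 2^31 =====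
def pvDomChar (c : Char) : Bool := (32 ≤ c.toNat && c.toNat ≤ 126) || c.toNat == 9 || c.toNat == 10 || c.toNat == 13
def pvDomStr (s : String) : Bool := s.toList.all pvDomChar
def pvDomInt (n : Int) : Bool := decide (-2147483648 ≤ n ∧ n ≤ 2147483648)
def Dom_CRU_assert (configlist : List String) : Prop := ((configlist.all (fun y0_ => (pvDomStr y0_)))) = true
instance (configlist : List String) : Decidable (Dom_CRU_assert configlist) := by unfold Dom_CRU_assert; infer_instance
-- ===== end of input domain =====

-- B replaces A's per-rule forward rescan for the closing 'exit' line (and the per-rule block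
-- re-join over a scan from the rule line) by a single backward pass that maintains the current
-- block's lines incrementally (objective: faster).

-- ===== PORT A =====
-- inner `for j in range(i, len(configlist))` loop with its break; state = (log_list, str);
-- Python str values are carried as List Char (PySem-exact), messages are built with PySem.Str.strip

def CRU_innerA (cl : List String) (i : Int) (ci : String) :
    List String × List Char → List Int → List String × List Char
  | st, [] => st
  | (log, s), j :: js =>
    match PySem.List.pyGet? cl j with
    | none => (log, s)
    | some cj =>
      if PySem.Str.find cj "exit" != -1 then
        let s := (PySem.List.slice cl (some i) (some j)).foldl (fun acc k => acc ++ k.toList) s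
        let log := log ++ (if PySem.Chars.find s "rating-group".toList == -1 then
                              [PySem.Str.strip ci ++ "未配置rating group"] else [])
        let log := log ++ (if PySem.Chars.find s "service-identifier".toList == -1 then
                              [PySem.Str.strip ci ++ "未配置service identifier"] else [])
        let log := log ++ (if PySem.Chars.find s "reporting-level service-id".toList == -1 then
                              [PySem.Str.strip ci ++ "未配置reporting-level"] else [])
        (log, [])
      else CRU_innerA cl i ci (log, s) js

def CRU_assert (configlist : List String) : List String :=
  ((PySem.List.pyRange 0 configlist.length).foldl (fun st i =>
      match PySem.List.pyGet? configlist i with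
      | none => st
      | some ci =>
        if PySem.Str.find ci "charging-rule-unit \"" != -1 &&
           PySem.Str.find ci "qci * arp * precedence" == -1 then
          CRU_innerA configlist i ci st (PySem.List.pyRange i configlist.length)
        else st)
    (([] : List String), ([] : List Char))).1

-- ===== PORT B =====
def CRU_assert_alt (configlist : List String) : List String :=
  (configlist.reverse.foldl
    (fun (st : List String × Option (List String)) line =>
      let rl : Option (List String) :=
        if PySem.Str.isIn "exit" line then some []
        else match st.2 with
          | none => none
          | some b => some (b ++ [line])
      if PySem.Str.isIn "charging-rule-unit \"" line &&
         !PySem.Str.isIn "qci * arp * precedence" line then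
        match rl with
        | none => (st.1, rl)
        | some b =>
          let block := PySem.Str.join "" b.reverse
          let head := PySem.Str.strip line
          let r := st.1
          let r := if !PySem.Str.isIn "reporting-level service-id" block then
                      r ++ [head ++ "未配置reporting-level"] else r
          let r := if !PySem.Str.isIn "service-identifier" block then
                      r ++ [head ++ "未配置service identifier"] else r
          let r := if !PySem.Str.isIn "rating-group" block then
                      r ++ [head ++ "未配置rating group"] else r
          (r, rl)
      else (st.1, rl))
    ([], none)).1.reverse

-- ===== PRECONDITION & SPEC =====
def Spec_CRU_assert (configlist : List String) (out : List String) : Prop := out = CRU_assert_alt configlist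
instance (configlist : List String) (out : List String) : Decidable (Spec_CRU_assert configlist out) := by unfold Spec_CRU_assert; infer_instance

-- ===== CLAIM (what is proved, stated in full; the proofs are below) =====
def Claim_equal_CRU_assert : Prop := ∀ (configlist : List String), Dom_CRU_assert configlist → Spec_CRU_assert configlist (CRU_assert configlist)

-- ===== LEMMAS AND PROOFS =====
-- CRU_blk l: the lines from the head of l up to (excluding) the first 'exit' line; none if no 'exit'

def CRU_blk : List String → Option (List String)
  | [] => none
  | x :: xs =>
    if PySem.Str.isIn "exit" x then some []
    else match CRU_blk xs with
      | none => none
      | some b => some (x :: b)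

def CRU_join (l : List String) : List Char := (l.map String.toList).flatten

def CRU_msgs (ci : String) (t : List Char) : List String :=
  (if !PySem.Chars.isIn "rating-group".toList t then [PySem.Str.strip ci ++ "未配置rating group"] else []) ++
  (if !PySem.Chars.isIn "service-identifier".toList t then [PySem.Str.strip ci ++ "未配置service identifier"] else []) ++
  (if !PySem.Chars.isIn "reporting-level service-id".toList t then [PySem.Str.strip ci ++ "未配置reporting-level"] else [])

def CRU_cond (x : String) : Bool :=
  PySem.Str.isIn "charging-rule-unit \"" x && !PySem.Str.isIn "qci * arp * precedence" x

def CRU_ref : List String → List String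
  | [] => []
  | x :: xs =>
    (if CRU_cond x then
        match CRU_blk (x :: xs) with
        | none => []
        | some b => CRU_msgs x (CRU_join b)
      else []) ++ CRU_ref xs

lemma CRU_cfind_bne (s sub : List Char) : (PySem.Chars.find s sub != -1) = PySem.Chars.isIn sub s := by
  by_cases h : sub <:+: s
  · have h1 := (PySem.Chars.find_ne_neg_one_iff s sub).mpr h
    have h2 := (PySem.Chars.isIn_iff_infix sub s).mpr h
    simp [h2, bne_iff_ne, h1]
  · have h1 := (PySem.Chars.find_eq_neg_one_iff s sub).mpr h
    have h2 := (PySem.Chars.isIn_eq_false_iff sub s).mpr h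
    simp [h1, h2]

lemma CRU_cfind_beq (s sub : List Char) : (PySem.Chars.find s sub == -1) = !PySem.Chars.isIn sub s := by
  by_cases h : sub <:+: s
  · have h1 := (PySem.Chars.find_ne_neg_one_iff s sub).mpr h
    have h2 := (PySem.Chars.isIn_iff_infix sub s).mpr h
    simp [h2, h1]
  · have h1 := (PySem.Chars.find_eq_neg_one_iff s sub).mpr h
    have h2 := (PySem.Chars.isIn_eq_false_iff sub s).mpr h
    simp [h1, h2]

lemma CRU_find_bne (s sub : String) : (PySem.Str.find s sub != -1) = PySem.Str.isIn sub s := by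
  rw [PySem.Str.isIn_eq, PySem.Str.find_eq]; exact CRU_cfind_bne _ _

lemma CRU_find_beq (s sub : String) : (PySem.Str.find s sub == -1) = !PySem.Str.isIn sub s := by
  rw [PySem.Str.isIn_eq, PySem.Str.find_eq]; exact CRU_cfind_beq _ _

lemma CRU_fold_concat (l : List String) (s : List Char) :
    l.foldl (fun acc k => acc ++ k.toList) s = s ++ CRU_join l := by
  induction l generalizing s with
  | nil => simp [CRU_join]
  | cons x xs ih => simp [CRU_join, List.foldl_cons, ih]

lemma CRU_join_append (a b : List String) : CRU_join (a ++ b) = CRU_join a ++ CRU_join b := by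
  simp [CRU_join]

lemma CRU_join_empty_sep (css : List (List Char)) : PySem.Chars.join [] css = css.flatten := by
  show List.intercalate [] css = css.flatten
  unfold List.intercalate
  induction css with
  | nil => simp
  | cons c cs ih =>
    cases cs with
    | nil => simp
    | cons d ds => simp_all [List.intersperse_cons₂]

lemma CRU_strjoin_toList (b : List String) : (PySem.Str.join "" b).toList = CRU_join b := by
  rw [PySem.Str.toList_join]
  show PySem.Chars.join [] (b.map String.toList) = CRU_join b
  rw [CRU_join_empty_sep, CRU_join]

lemma CRU_inner_eq (cl : List String) (ci : String) (i : Nat) :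
    ∀ (k j : Nat), cl.length - j = k → i ≤ j → j ≤ cl.length → ∀ (log : List String) (s : List Char),
      CRU_innerA cl (i : Int) ci (log, s) (PySem.List.pyRange (j : Int) (cl.length : Int)) =
        match CRU_blk (cl.drop j) with
        | none => (log, s)
        | some b => (log ++ CRU_msgs ci (s ++ CRU_join ((cl.drop i).take (j - i)) ++ CRU_join b), []) := by
  intro k
  induction k with
  | zero =>
    intro j hk hij hj log s
    have hje : j = cl.length := by omega
    rw [hje]
    have hr : PySem.List.pyRange ((cl.length : Nat) : Int) ((cl.length : Nat) : Int) = [] := by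
      simp [PySem.List.pyRange]
    rw [hr]
    simp [CRU_innerA, CRU_blk, List.drop_length]
  | succ k ih =>
    intro j hk hij hj log s
    have hlt : j < cl.length := by omega
    have hlt' : (j : Int) < (cl.length : Int) := by exact_mod_cast hlt
    rw [PySem.List.pyRange_one_cons hlt']
    have hcast : ((j : Int) + 1) = ((j + 1 : Nat) : Int) := by push_cast; ring
    rw [hcast]
    have hget : PySem.List.pyGet? cl (j : Int) = some cl[j] := by
      rw [PySem.List.pyGet?_natCast, List.getElem?_eq_getElem hlt]
    rw [CRU_innerA, hget]
    simp only []
    rw [List.drop_eq_getElem_cons hlt, CRU_blk]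
    rw [CRU_find_bne]
    by_cases hx : PySem.Str.isIn "exit" cl[j] = true
    · rw [hx]
      simp only [if_pos trivial]
      rw [CRU_fold_concat]
      have hsl : PySem.List.slice cl (some (i:Int)) (some (j:Int)) = (cl.drop i).take (j - i) := by
        rw [PySem.List.slice_natCast]
      rw [hsl]
      simp [CRU_msgs, CRU_cfind_beq, CRU_join, List.append_assoc]
    · rw [Bool.not_eq_true] at hx
      rw [hx]
      simp only [ite_false, Bool.false_eq_true]
      rw [ih (j+1) (by omega) (by omega) (by omega) log s]
      cases hb : CRU_blk (cl.drop (j+1)) with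
      | none => simp
      | some b =>
        simp only []
        have hjoin : CRU_join ((cl.drop i).take (j + 1 - i)) = CRU_join ((cl.drop i).take (j - i)) ++ cl[j].toList := by
          have h1 : j + 1 - i = (j - i) + 1 := by omega
          rw [h1, List.take_add_one]
          have h2 : (cl.drop i)[j - i]? = some cl[j] := by
            rw [List.getElem?_drop]
            rw [List.getElem?_eq_getElem (by omega)]
            congr 1
            congr 1
            omega
          rw [h2, CRU_join_append]
          simp [CRU_join]
        rw [hjoin]
        simp [CRU_join, List.append_assoc]

lemma CRU_body_step (cl : List String) (m : Nat) (hlt : m < cl.length) (log : List String) :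
    (match PySem.List.pyGet? cl (m : Int) with
      | none => (log, ([] : List Char))
      | some ci =>
        if PySem.Str.find ci "charging-rule-unit \"" != -1 &&
           PySem.Str.find ci "qci * arp * precedence" == -1 then
          CRU_innerA cl (m : Int) ci (log, ([] : List Char)) (PySem.List.pyRange (m : Int) cl.length)
        else (log, ([] : List Char)))
    = (log ++ (if CRU_cond cl[m] then
                  match CRU_blk (cl.drop m) with
                  | none => []
                  | some b => CRU_msgs cl[m] (CRU_join b)
                else []), ([] : List Char)) := by
  have hget : PySem.List.pyGet? cl (m : Int) = some cl[m] := by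
    rw [PySem.List.pyGet?_natCast, List.getElem?_eq_getElem hlt]
  rw [hget]
  simp only [CRU_find_bne, CRU_find_beq]
  by_cases hc : CRU_cond cl[m] = true
  · rw [show (PySem.Str.isIn "charging-rule-unit \"" cl[m] && !PySem.Str.isIn "qci * arp * precedence" cl[m]) = true from hc, hc]
    simp only [ite_true]
    rw [CRU_inner_eq cl cl[m] m (cl.length - m) m rfl le_rfl (by omega) log []]
    cases hb : CRU_blk (cl.drop m) with
    | none => simp
    | some b => simp [CRU_join]
  · rw [Bool.not_eq_true] at hc
    rw [show (PySem.Str.isIn "charging-rule-unit \"" cl[m] && !PySem.Str.isIn "qci * arp * precedence" cl[m]) = false from hc, hc]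
    simp

lemma CRU_outer_eq (cl : List String) :
    ∀ (k m : Nat), cl.length - m = k → m ≤ cl.length → ∀ (log : List String),
      (PySem.List.pyRange (m : Int) (cl.length : Int)).foldl (fun st i =>
        match PySem.List.pyGet? cl i with
        | none => st
        | some ci =>
          if PySem.Str.find ci "charging-rule-unit \"" != -1 &&
             PySem.Str.find ci "qci * arp * precedence" == -1 then
            CRU_innerA cl i ci st (PySem.List.pyRange i cl.length)
          else st) (log, ([] : List Char)) = (log ++ CRU_ref (cl.drop m), []) := by
  intro k
  induction k with
  | zero =>
    intro m hk hm log
    have hme : m = cl.length := by omega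
    rw [hme]
    have hr : PySem.List.pyRange ((cl.length : Nat) : Int) ((cl.length : Nat) : Int) = [] := by
      simp [PySem.List.pyRange]
    rw [hr]
    simp [CRU_ref, List.drop_length]
  | succ k ih =>
    intro m hk hm log
    have hlt : m < cl.length := by omega
    have hlt' : (m : Int) < (cl.length : Int) := by exact_mod_cast hlt
    rw [PySem.List.pyRange_one_cons hlt']
    have hcast : ((m : Int) + 1) = ((m + 1 : Nat) : Int) := by push_cast; ring
    rw [List.foldl_cons]
    have hstep := CRU_body_step cl m hlt log
    simp only [] at hstep ⊢
    rw [hstep, hcast, ih (m+1) (by omega) (by omega)]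
    have hdrop : cl.drop m = cl[m] :: cl.drop (m+1) := List.drop_eq_getElem_cons hlt
    rw [hdrop, CRU_ref, ← hdrop]
    simp [List.append_assoc]

lemma CRU_A_eq_ref (cl : List String) : CRU_assert cl = CRU_ref cl := by
  unfold CRU_assert
  have h0 : (0 : Int) = ((0 : Nat) : Int) := by norm_num
  rw [h0, CRU_outer_eq cl cl.length 0 (by omega) (by omega) []]
  simp

lemma CRU_B_fold (cl : List String) :
    cl.reverse.foldl
      (fun (st : List String × Option (List String)) line =>
        let rl : Option (List String) :=
          if PySem.Str.isIn "exit" line then some []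
          else match st.2 with
            | none => none
            | some b => some (b ++ [line])
        if PySem.Str.isIn "charging-rule-unit \"" line &&
           !PySem.Str.isIn "qci * arp * precedence" line then
          match rl with
          | none => (st.1, rl)
          | some b =>
            let block := PySem.Str.join "" b.reverse
            let head := PySem.Str.strip line
            let r := st.1
            let r := if !PySem.Str.isIn "reporting-level service-id" block then
                        r ++ [head ++ "未配置reporting-level"] else r
            let r := if !PySem.Str.isIn "service-identifier" block then
                        r ++ [head ++ "未配置service identifier"] else r
            let r := if !PySem.Str.isIn "rating-group" block then
                        r ++ [head ++ "未配置rating group"] else r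
            (r, rl)
        else (st.1, rl))
      ([], none)
    = ((CRU_ref cl).reverse, (CRU_blk cl).map List.reverse) := by
  induction cl with
  | nil => simp [CRU_ref, CRU_blk]
  | cons x xs ih =>
    rw [List.reverse_cons, List.foldl_append, ih, List.foldl_cons, List.foldl_nil]
    simp only []
    have hrl : (if PySem.Str.isIn "exit" x then some ([] : List String)
                else match (CRU_blk xs).map List.reverse with
                  | none => none
                  | some b => some (b ++ [x]))
              = (CRU_blk (x :: xs)).map List.reverse := by
      rw [CRU_blk]
      by_cases hx : PySem.Str.isIn "exit" x = true
      · rw [if_pos hx, if_pos hx]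
        rfl
      · rw [if_neg hx, if_neg hx]
        cases hb : CRU_blk xs with
        | none => rfl
        | some b0 => simp
    rw [hrl]
    by_cases hc : CRU_cond x = true
    · rw [show (PySem.Str.isIn "charging-rule-unit \"" x && !PySem.Str.isIn "qci * arp * precedence" x) = true from hc]
      simp only [ite_true]
      rw [CRU_ref]
      rw [hc]
      simp only [ite_true]
      cases hb : CRU_blk (x :: xs) with
      | none => simp
      | some b0 =>
        simp only [Option.map_some]
        have hrev : b0.reverse.reverse = b0 := List.reverse_reverse b0
        rw [hrev]
        have hIs : ∀ kw : String, PySem.Str.isIn kw (PySem.Str.join "" b0) = PySem.Chars.isIn kw.toList (CRU_join b0) := by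
          intro kw
          rw [PySem.Str.isIn_eq, CRU_strjoin_toList]
        rw [hIs, hIs, hIs]
        rw [CRU_msgs]
        split_ifs <;> simp
    · rw [Bool.not_eq_true] at hc
      rw [show (PySem.Str.isIn "charging-rule-unit \"" x && !PySem.Str.isIn "qci * arp * precedence" x) = false from hc]
      simp only [Bool.false_eq_true, ite_false]
      rw [CRU_ref, hc]
      simp

lemma CRU_B_eq_ref (cl : List String) : CRU_assert_alt cl = CRU_ref cl := by
  unfold CRU_assert_alt
  rw [CRU_B_fold]
  simp

-- ===== VERDICT (by name: the statement is the Claim_ definition above) =====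
theorem CRU_assert_spec : Claim_equal_CRU_assert := by
  intro cl _
  unfold Spec_CRU_assert
  rw [CRU_A_eq_ref, CRU_B_eq_ref]
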